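-- pv_equiv track=rewrite | github.com/ColdMacaroni/slot-machine | slots.py | middle_peak_line
-- ===== SOURCE A (Python) =====
-- def middle_peak_line(columns):
--     """
--     Coordinates for a middle peak line, if columns is even, it has 2
--     peaks.
--     Odd: ___/\\___
--     Even: ___/¯\\___
--     :param columns: Amount of columns to generate for
--     :return: List
--     """
--     # NOTE: Floor divide by two gets the index of the middle element
--     # in odd lists or the index of the element to the right of the
--     # middle in even lists.
--     #
--     # Odd demo:
--     # len(ls) == 5
--     # 5 // 2 == 2
--     # Indexes: 0 1 2 3 4
--     #              ^ Middle
--     #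
--     # Even demo
--     # len(ls) == 6
--     # 6 // 2 == 3
--     # Indexes: 0 1 2 3 4 5
--     #                ^ Right of middle
--
--     # Get the index of the midpoint
--     # This is a list in case theres more than one midpoint.
--     mid = [columns // 2]
--
--     # If the # of columns is even, also get the index to the left of
--     # the middle
--     if not columns % 2:
--         mid.append(mid[0] - 1)
--
--     # Make coords at the middle 1 y higher
--     line = []
--     for x in range(columns):
--         line.append(
--             (x, 1) if x in mid else (x, 0)
--         )
--
--     return line
-- ===== SOURCE B (Python) =====
-- def middle_peak_line(columns):
--     # Segment concatenation: left zeros ++ peak (width 1 or 2) ++ right zeros.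
--     if columns <= 0:
--         return []
--     k = 2 - columns % 2            # number of peak columns: 1 if odd, 2 if even
--     l = (columns - k) // 2         # length of the left zero segment
--     return ([(x, 0) for x in range(l)]
--             + [(x, 1) for x in range(l, l + k)]
--             + [(x, 0) for x in range(l + k, columns)])
-- ===== Notes on version B (the rewrite author's own statement) =====
-- stated objective: alternative
-- what changed: B computes the peak width (one column if odd, two if even) and the left-segment length up front and returns the concatenation of three arithmetic segments (left zeros, peak ones, right zeros), with no per-element membership test and no patching.
import Mathlib
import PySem

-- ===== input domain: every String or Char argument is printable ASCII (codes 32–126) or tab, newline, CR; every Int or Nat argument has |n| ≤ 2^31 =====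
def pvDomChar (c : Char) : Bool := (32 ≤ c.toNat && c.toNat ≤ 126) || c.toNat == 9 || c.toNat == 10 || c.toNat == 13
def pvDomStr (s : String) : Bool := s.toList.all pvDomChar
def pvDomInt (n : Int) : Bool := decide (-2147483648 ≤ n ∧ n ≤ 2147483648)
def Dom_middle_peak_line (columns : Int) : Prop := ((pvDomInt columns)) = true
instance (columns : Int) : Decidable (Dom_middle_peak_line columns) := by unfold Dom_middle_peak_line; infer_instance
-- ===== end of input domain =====

-- B returns the concatenation of three arithmetic segments (left zeros ++ peak ++ right zeros) instead of A's per-element membership test; objective: alternative.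


-- ===== PORT A =====
def middle_peak_line (columns : Int) : List (Int × Int) :=
  -- mid = [columns // 2]; if not columns % 2: mid.append(mid[0] - 1)
  let mid : List Int := [PySem.Int.floordiv columns 2]
  let mid : List Int :=
    if PySem.Int.mod columns 2 == 0 then mid ++ [PySem.Int.floordiv columns 2 - 1] else mid
  -- line = []; for x in range(columns): line.append((x,1) if x in mid else (x,0))
  (PySem.List.pyRange 0 columns 1).foldl
    (fun line x => line ++ [if x ∈ mid then (x, (1 : Int)) else (x, 0)]) []

-- ===== PORT B =====
def middle_peak_line_alt (columns : Int) : List (Int × Int) :=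
  if columns ≤ 0 then []
  else
    -- k = 2 - columns % 2; l = (columns - k) // 2
    let k := 2 - PySem.Int.mod columns 2
    let l := PySem.Int.floordiv (columns - k) 2
    ((PySem.List.pyRange 0 l 1).map (fun x => (x, (0 : Int)))) ++
    ((PySem.List.pyRange l (l + k) 1).map (fun x => (x, (1 : Int)))) ++
    ((PySem.List.pyRange (l + k) columns 1).map (fun x => (x, (0 : Int))))

-- ===== PRECONDITION & SPEC =====
def Spec_middle_peak_line (columns : Int) (out : List (Int × Int)) : Prop := out = middle_peak_line_alt columns
instance (columns : Int) (out : List (Int × Int)) : Decidable (Spec_middle_peak_line columns out) := by unfold Spec_middle_peak_line; infer_instance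

-- ===== CLAIM =====
def Claim_equal_middle_peak_line : Prop := ∀ (columns : Int), Dom_middle_peak_line columns → Spec_middle_peak_line columns (middle_peak_line columns)

-- ===== LEMMAS AND PROOFS =====

theorem mpl_eq (columns : Int) :
    middle_peak_line columns = middle_peak_line_alt columns := by
  unfold middle_peak_line middle_peak_line_alt
  rw [PySem.List.foldl_append_singleton_eq_map]
  by_cases hpos : columns ≤ 0
  · have hnil : PySem.List.pyRange 0 columns 1 = [] :=
      PySem.List.pyRange_one_eq_nil (by omega)
    simp [hnil, hpos]
  · have h2 : (0:Int) < 2 := by norm_num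
    simp only [hpos, List.nil_append,
      PySem.Int.floordiv_eq_ediv_of_pos h2, PySem.Int.mod_eq_emod_of_pos h2]
    set k : Int := 2 - columns % 2 with hk
    set l : Int := (columns - k) / 2 with hl
    have hm0 := Int.emod_nonneg columns (show (2:Int) ≠ 0 by norm_num)
    have hm1 := Int.emod_lt_of_pos columns h2
    have hdiv := Int.mul_ediv_add_emod (columns - k) 2
    have hdiv2 := Int.mul_ediv_add_emod columns 2
    have hkmod : (columns - k) % 2 = 0 := by omega
    -- membership in mid ↔ l ≤ x < l + k
    have hmid : ∀ x : Int,
        (x ∈ (if (columns % 2 == 0) then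
                [columns / 2] ++ [columns / 2 - 1]
              else [columns / 2])) ↔ (l ≤ x ∧ x < l + k) := by
      intro x
      by_cases hev : columns % 2 = 0
      · simp only [hev, beq_self_eq_true, if_pos, List.mem_append, List.mem_singleton]
        omega
      · have : ¬ (columns % 2 == 0) = true := by simpa using hev
        simp only [this, if_neg, List.mem_singleton, Bool.not_eq_true]
        omega
    have hb1 : (0:Int) ≤ l := by omega
    have hb2 : l + k ≤ columns := by omega
    rw [PySem.List.pyRange_one_append 0 l columns hb1 (by omega),
        PySem.List.pyRange_one_append l (l + k) columns (by omega) hb2,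
        List.map_append, List.map_append, List.append_assoc]
    congr 1
    · refine List.map_congr_left (fun x hx => ?_)
      have hxr := (PySem.List.mem_pyRange_one).1 hx
      have hno : ¬ (l ≤ x ∧ x < l + k) := by omega
      rw [if_neg (fun h => hno ((hmid x).1 h))]
    congr 1
    · refine List.map_congr_left (fun x hx => ?_)
      have hxr := (PySem.List.mem_pyRange_one).1 hx
      rw [if_pos ((hmid x).2 ⟨hxr.1, hxr.2⟩)]
    · refine List.map_congr_left (fun x hx => ?_)
      have hxr := (PySem.List.mem_pyRange_one).1 hx
      have hno : ¬ (l ≤ x ∧ x < l + k) := by omega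
      rw [if_neg (fun h => hno ((hmid x).1 h))]

-- ===== VERDICT =====
theorem middle_peak_line_spec : Claim_equal_middle_peak_line := by
  intro columns _
  exact mpl_eq columns
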